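-- pv_equiv track=rewrite | github.com/ferryhe/web_listening | web_listening/blocks/monitor_scope_planner.py | minimize_prefixes
-- ===== SOURCE A (Python) =====
-- def _normalize_prefix(value: str) -> str:
--     normalized = str(value or "").strip()
--     if not normalized:
--         return ""
--     if not normalized.startswith("/"):
--         normalized = "/" + normalized
--     while normalized != "/" and normalized.endswith("/"):
--         normalized = normalized[:-1]
--     return normalized or "/"
--
-- def _path_level(path: str) -> int:
--     normalized = _normalize_prefix(path)
--     if normalized in {"", "/"}:
--         return 0
--     return len([part for part in normalized.strip("/").split("/") if part])
--
-- def _covers(prefix: str, candidate: str) -> bool: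
--     normalized_prefix = _normalize_prefix(prefix)
--     normalized_candidate = _normalize_prefix(candidate)
--     if not normalized_prefix or not normalized_candidate:
--         return False
--     if normalized_prefix == "/":
--         return True
--     return normalized_candidate == normalized_prefix or normalized_candidate.startswith(normalized_prefix + "/")
--
-- def _dedupe_prefixes(values: list[str]) -> list[str]:
--     seen: set[str] = set()
--     result: list[str] = []
--     for value in values:
--         normalized = _normalize_prefix(value)
--         if not normalized or normalized in seen:
--             continue
--         seen.add(normalized)
--         result.append(normalized)
--     return result
--
-- def minimize_prefixes(values: list[str]) -> list[str]:
--     normalized = _dedupe_prefixes(values)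
--     ordered = sorted(
--         enumerate(normalized),
--         key=lambda item: (_path_level(item[1]), len(item[1]), item[0]),
--     )
--     kept: list[str] = []
--     for _, candidate in ordered:
--         if any(_covers(prefix, candidate) for prefix in kept):
--             continue
--         kept.append(candidate)
--     return kept
-- ===== SOURCE B (Python) =====
-- def _normalize_prefix(value: str) -> str:
--     normalized = str(value or "").strip()
--     if not normalized:
--         return ""
--     if not normalized.startswith("/"):
--         normalized = "/" + normalized
--     while normalized != "/" and normalized.endswith("/"):
--         normalized = normalized[:-1]
--     return normalized or "/"
--
-- def _path_level(path: str) -> int: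
--     normalized = _normalize_prefix(path)
--     if normalized in {"", "/"}:
--         return 0
--     return len([part for part in normalized.strip("/").split("/") if part])
--
-- def minimize_prefixes(values: list[str]) -> list[str]:
--     seen = set()
--     normalized = []
--     for value in values:
--         n = _normalize_prefix(value)
--         if n and n not in seen:
--             seen.add(n)
--             normalized.append(n)
--     # stable sort: the index tiebreak of A's key is exactly stable order
--     ordered = sorted(normalized, key=lambda c: (_path_level(c), len(c)))
--     kept_norms = set()
--     kept = []
--     for candidate in ordered:
--         n = _normalize_prefix(candidate)
--         if ("/" in kept_norms or n in kept_norms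
--                 or any(n[:i] in kept_norms for i in range(1, len(n)) if n[i] == "/")):
--             continue
--         kept_norms.add(n)
--         kept.append(candidate)
--     return kept
-- ===== Notes on version B (the rewrite author's own statement) =====
-- stated objective: faster
-- what changed: B replaces A's per-candidate inner scan of all kept prefixes (each _covers call re-normalizing both strings) with a set of the normalized kept prefixes and a membership test of the candidate's ancestor path prefixes, and drops the enumerate/index tiebreak in favour of the stable sort order.
import Mathlib
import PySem

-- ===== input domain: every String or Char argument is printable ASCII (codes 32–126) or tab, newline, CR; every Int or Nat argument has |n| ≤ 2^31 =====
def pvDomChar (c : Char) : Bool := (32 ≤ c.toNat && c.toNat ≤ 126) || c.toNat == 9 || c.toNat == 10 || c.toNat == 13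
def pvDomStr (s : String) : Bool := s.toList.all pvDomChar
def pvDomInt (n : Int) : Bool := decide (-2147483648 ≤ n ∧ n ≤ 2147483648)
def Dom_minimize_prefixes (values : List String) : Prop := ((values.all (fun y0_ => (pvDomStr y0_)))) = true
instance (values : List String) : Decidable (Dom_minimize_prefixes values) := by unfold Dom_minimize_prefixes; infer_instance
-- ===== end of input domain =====

-- B replaces A's per-candidate scan of all kept prefixes (each re-normalized by _covers)
-- with one set of normalized kept prefixes, testing the candidate's ancestor paths for
-- membership; objective: faster (inner scan over kept disappears).


-- ===== PORT A =====
-- the while loop of _normalize_prefix: drop trailing "/" while normalized != "/" and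
-- endswith "/"; each pass drops one char, so fuel = length is enough (fuel only bounds
-- the iteration count, it never changes the result)
def pvDropSlash : Nat → List Char → List Char
  | 0, s => s
  | fuel + 1, s =>
    if s ≠ ['/'] ∧ PySem.Chars.endswith s ['/'] then
      pvDropSlash fuel (PySem.List.slice s none (some (-1)))   -- normalized = normalized[:-1]
    else s

-- _normalize_prefix (on List Char; 'str(value or "")' has the same characters as value).
-- withSlash is the 'if not normalized.startswith("/"): normalized = "/" + normalized' step.
def withSlash (n : List Char) : List Char :=
  if PySem.Chars.startswith n ['/'] then n else ['/'] ++ n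

def normalizeChars (cs : List Char) : List Char :=
  if PySem.Chars.strip cs = [] then []      -- 'if not normalized: return ""'
  else if pvDropSlash (withSlash (PySem.Chars.strip cs)).length (withSlash (PySem.Chars.strip cs)) = []
  then ['/']                                -- 'return normalized or "/"'
  else pvDropSlash (withSlash (PySem.Chars.strip cs)).length (withSlash (PySem.Chars.strip cs))

-- _path_level
def pathLevel (path : List Char) : Int :=
  if normalizeChars path = [] ∨ normalizeChars path = ['/'] then 0
  else ((PySem.Chars.splitOn (PySem.Chars.stripChars (normalizeChars path) ['/']) ['/']).filter
          (fun part => part ≠ [])).length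

-- _covers
def covers (pfx cand : List Char) : Bool :=
  if normalizeChars pfx = [] ∨ normalizeChars cand = [] then false
  else if normalizeChars pfx = ['/'] then true
  else normalizeChars cand == normalizeChars pfx ||
       PySem.Chars.startswith (normalizeChars cand) (normalizeChars pfx ++ ['/'])

-- _dedupe_prefixes (state = (seen, result))
def dedupePrefixes (values : List String) : List (List Char) :=
  (values.foldl
    (fun (st : PySem.Set (List Char) × List (List Char)) v =>
      if normalizeChars v.toList = [] ∨ st.1.contains (normalizeChars v.toList) then st
      else (st.1.add (normalizeChars v.toList), st.2 ++ [normalizeChars v.toList]))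
    (PySem.Set.empty, [])).2

-- sorted(enumerate(normalized), key=(level, len, idx)): enumerate's indices strictly
-- increase and PySem.List.sorted2 is stable, so the idx component of Python's key is
-- exactly the stable tie order: sorted2 by (level, len) is the same permutation.
def minimize_prefixes (values : List String) : List String :=
  ((PySem.List.sorted2 (PySem.List.enumerate (dedupePrefixes values))
      (fun it => pathLevel it.2) (fun it => (it.2.length : Int))).foldl
    (fun kept it => if kept.any (fun p => covers p it.2) then kept else kept ++ [it.2])
    []).map String.ofList

-- ===== PORT B =====
-- inline dedupe loop of Source B (state = (seen, normalized))
def dedupeAlt (values : List String) : List (List Char) :=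
  (values.foldl
    (fun (st : PySem.Set (List Char) × List (List Char)) v =>
      if normalizeChars v.toList ≠ [] ∧ st.1.contains (normalizeChars v.toList) = false
      then (st.1.add (normalizeChars v.toList), st.2 ++ [normalizeChars v.toList]) else st)
    (PySem.Set.empty, [])).2

-- the kept-loop body of Source B: kept_norms (a set) plus kept; n = _normalize_prefix(candidate),
-- covered iff "/" or n or an ancestor prefix n[:i] (n[i] == "/") is in kept_norms
def keepStep (st : PySem.Set (List Char) × List (List Char)) (c : List Char) :
    PySem.Set (List Char) × List (List Char) :=
  if st.1.contains ['/'] || st.1.contains (normalizeChars c) ||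
      (PySem.List.pyRange 1 ((normalizeChars c).length : Int) 1).any
        (fun i => decide (PySem.List.pyGetD (normalizeChars c) i ' ' = '/') &&
                  st.1.contains (PySem.List.slice (normalizeChars c) none (some i)))
  then st
  else (st.1.add (normalizeChars c), st.2 ++ [c])

def minimize_prefixes_alt (values : List String) : List String :=
  ((PySem.List.sorted2 (dedupeAlt values)
      (fun c => pathLevel c) (fun c => (c.length : Int))).foldl
    keepStep (PySem.Set.empty, [])).2.map String.ofList

-- ===== PRECONDITION & SPEC =====
def Spec_minimize_prefixes (values : List String) (out : List String) : Prop := out = minimize_prefixes_alt values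
instance (values : List String) (out : List String) : Decidable (Spec_minimize_prefixes values out) := by unfold Spec_minimize_prefixes; infer_instance

-- ===== CLAIM (what is proved, stated in full; the proofs are below) =====
def Claim_equal_minimize_prefixes : Prop := ∀ (values : List String), Dom_minimize_prefixes values → Spec_minimize_prefixes values (minimize_prefixes values)

-- ===== LEMMAS AND PROOFS =====

-- a value is the (nonempty) output of _normalize_prefix
def IsNorm (p : List Char) : Prop := p ≠ [] ∧ ∃ v, normalizeChars v = p

theorem pvDropSlash_prefix (f : Nat) (s : List Char) : pvDropSlash f s <+: s := by
  induction f generalizing s with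
  | zero => simp [pvDropSlash]
  | succ f ih =>
    rw [pvDropSlash]
    split
    · refine (ih _).trans ?_
      rw [PySem.List.slice_to_neg_one]
      exact List.dropLast_prefix s
    · exact List.prefix_rfl

theorem withSlash_head (n : List Char) (h : n ≠ []) : ∃ t, withSlash n = '/' :: t := by
  unfold withSlash
  split_ifs with hs
  · rw [PySem.Chars.startswith] at hs
    obtain ⟨t, ht⟩ := List.isPrefixOf_iff_prefix.mp hs
    exact ⟨t, ht.symm⟩
  · exact ⟨n, rfl⟩

theorem norm_head (cs : List Char) (h : normalizeChars cs ≠ []) :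
    ∃ t, normalizeChars cs = '/' :: t := by
  unfold normalizeChars at h ⊢
  split_ifs at h ⊢ with h1 h2
  · exact absurd rfl h
  · exact ⟨[], rfl⟩
  · obtain ⟨t, ht⟩ := withSlash_head (PySem.Chars.strip cs) h1
    have hpre := pvDropSlash_prefix (withSlash (PySem.Chars.strip cs)).length
      (withSlash (PySem.Chars.strip cs))
    rw [ht] at hpre
    cases hr : pvDropSlash (withSlash (PySem.Chars.strip cs)).length
        (withSlash (PySem.Chars.strip cs)) with
    | nil => exact absurd hr h2
    | cons a u =>
      rw [ht] at hr
      rw [hr] at hpre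
      rw [(List.cons_prefix_cons.mp hpre).1]
      exact ⟨u, rfl⟩

theorem strip_ne (s : List Char) (c : Char) (hc : c ∈ s)
    (hns : PySem.Chars.isspace c = false) : PySem.Chars.strip s ≠ [] := by
  intro h
  unfold PySem.Chars.strip PySem.Chars.rstrip PySem.Chars.lstrip at h
  rw [List.reverse_eq_nil_iff] at h
  have h2 := List.dropWhile_eq_nil_iff.mp h
  have hall : ∀ x ∈ s, PySem.Chars.isspace x = true := by
    intro x hx
    have hx' : x ∈ List.takeWhile PySem.Chars.isspace s ++ List.dropWhile PySem.Chars.isspace s := by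
      rw [List.takeWhile_append_dropWhile]; exact hx
    rcases List.mem_append.mp hx' with h1 | h1
    · exact List.mem_takeWhile_imp h1
    · exact h2 x (List.mem_reverse.mpr h1)
  rw [hall c hc] at hns; cases hns

theorem norm_ne_of_strip_ne (cs : List Char) (h : PySem.Chars.strip cs ≠ []) :
    normalizeChars cs ≠ [] := by
  unfold normalizeChars
  split_ifs with h1 h2
  · exact absurd h1 h
  · simp
  · assumption

theorem isnorm_norm_ne (p : List Char) (hp : IsNorm p) : normalizeChars p ≠ [] := by
  obtain ⟨hne, v, hv⟩ := hp
  obtain ⟨t, ht⟩ := norm_head v (hv ▸ hne)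
  have hmem : '/' ∈ p := by rw [← hv, ht]; exact List.mem_cons_self
  exact norm_ne_of_strip_ne p (strip_ne p '/' hmem (by decide))

theorem dedupe_eq (values : List String) : dedupeAlt values = dedupePrefixes values := by
  unfold dedupeAlt dedupePrefixes
  have h : (fun (st : PySem.Set (List Char) × List (List Char)) (v : String) =>
      if normalizeChars v.toList ≠ [] ∧ st.1.contains (normalizeChars v.toList) = false
      then (st.1.add (normalizeChars v.toList), st.2 ++ [normalizeChars v.toList]) else st) =
      (fun st v =>
      if normalizeChars v.toList = [] ∨ st.1.contains (normalizeChars v.toList) then st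
      else (st.1.add (normalizeChars v.toList), st.2 ++ [normalizeChars v.toList])) := by
    funext st v
    by_cases h1 : normalizeChars v.toList = [] <;>
      by_cases h2 : st.1.contains (normalizeChars v.toList) = true <;> simp [h1, h2]
  rw [h]

theorem dedupe_isnorm_aux (values : List String) :
    ∀ (st : PySem.Set (List Char) × List (List Char)), (∀ p ∈ st.2, IsNorm p) →
    ∀ p ∈ (values.foldl
      (fun (st : PySem.Set (List Char) × List (List Char)) v =>
        if normalizeChars v.toList = [] ∨ st.1.contains (normalizeChars v.toList) then st
        else (st.1.add (normalizeChars v.toList), st.2 ++ [normalizeChars v.toList]))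
      st).2, IsNorm p := by
  induction values with
  | nil => intro st h p hp; exact h p hp
  | cons v vs ih =>
    intro st h p hp
    rw [List.foldl_cons] at hp
    split_ifs at hp with hg
    · exact ih st h p hp
    · refine ih _ ?_ p hp
      intro q hq
      rcases List.mem_append.mp hq with hq | hq
      · exact h q hq
      · rw [List.mem_singleton.mp hq]
        rw [not_or] at hg
        exact ⟨hg.1, v.toList, rfl⟩

theorem dedupe_isnorm (values : List String) :
    ∀ p ∈ dedupePrefixes values, IsNorm p := by
  unfold dedupePrefixes
  exact dedupe_isnorm_aux values _ (by intro p hp; cases hp)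

theorem map_insertBy {α β : Type} (f : α → β) (bA : α → α → Bool) (bB : β → β → Bool)
    (h : ∀ x y, bA x y = bB (f x) (f y)) (x : α) (ys : List α) :
    (PySem.List.insertBy bA x ys).map f = PySem.List.insertBy bB (f x) (ys.map f) := by
  induction ys with
  | nil => simp [PySem.List.insertBy]
  | cons y ys ih =>
    simp only [PySem.List.insertBy, List.map_cons, h x y]
    split <;> simp_all

theorem map_foldl_insertBy {α β : Type} (f : α → β) (bA : α → α → Bool) (bB : β → β → Bool)
    (h : ∀ x y, bA x y = bB (f x) (f y)) (l : List α) :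
    ∀ (acc : List α),
      (l.foldl (fun a x => PySem.List.insertBy bA x a) acc).map f =
        (l.map f).foldl (fun a y => PySem.List.insertBy bB y a) (acc.map f) := by
  induction l with
  | nil => intro acc; simp
  | cons x l ih =>
    intro acc
    simp only [List.foldl_cons, List.map_cons, ih, map_insertBy f bA bB h]

theorem snd_sorted2 (N : List (List Char)) :
    (PySem.List.sorted2 (PySem.List.enumerate N)
        (fun it => pathLevel it.2) (fun it => (it.2.length : Int))).map (fun it => it.2)
      = PySem.List.sorted2 N (fun c => pathLevel c) (fun c => (c.length : Int)) := by
  refine Eq.trans (map_foldl_insertBy (fun it : Int × List Char => it.2)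
      (fun x y => decide (pathLevel x.2 < pathLevel y.2) ||
        (!decide (pathLevel y.2 < pathLevel x.2) && decide ((x.2.length : Int) < (y.2.length : Int))))
      (fun x y => decide (pathLevel x < pathLevel y) ||
        (!decide (pathLevel y < pathLevel x) && decide ((x.length : Int) < (y.length : Int))))
      (fun x y => rfl) (PySem.List.enumerate N) []) ?_
  rw [PySem.List.map_snd_enumerate]
  rfl

theorem covers_iff (p c : List Char) (hp : IsNorm p) (hc : IsNorm c) :
    covers p c = true ↔
      (normalizeChars p = ['/'] ∨ normalizeChars p = normalizeChars c ∨
        (normalizeChars p ++ ['/']) <+: normalizeChars c) := by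
  unfold covers
  have h1 : ¬(normalizeChars p = [] ∨ normalizeChars c = []) := by
    rintro (h | h)
    exacts [isnorm_norm_ne p hp h, isnorm_norm_ne c hc h]
  rw [if_neg h1]
  split_ifs with h2
  · simp [h2]
  · simp only [Bool.or_eq_true, beq_iff_eq, PySem.Chars.startswith,
      List.isPrefixOf_iff_prefix, h2, false_or]
    constructor
    · rintro (h | h)
      exacts [Or.inl h.symm, Or.inr h]
    · rintro (h | h)
      exacts [Or.inl h.symm, Or.inr h]

theorem guard_eq (kA : List (List Char)) (S : PySem.Set (List Char)) (c : List Char)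
    (hmem : ∀ x, x ∈ S ↔ ∃ p ∈ kA, normalizeChars p = x)
    (hkA : ∀ p ∈ kA, IsNorm p) (hc : IsNorm c) :
    (kA.any (fun p => covers p c)) =
    (S.contains ['/'] || S.contains (normalizeChars c) ||
      (PySem.List.pyRange 1 ((normalizeChars c).length : Int) 1).any
        (fun i => decide (PySem.List.pyGetD (normalizeChars c) i ' ' = '/') &&
                  S.contains (PySem.List.slice (normalizeChars c) none (some i)))) := by
  have hncne : normalizeChars c ≠ [] := isnorm_norm_ne c hc
  rw [Bool.eq_iff_iff]
  simp only [List.any_eq_true, Bool.or_eq_true, PySem.Set.contains_iff, hmem,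
    Bool.and_eq_true, decide_eq_true_eq]
  constructor
  · rintro ⟨p, hpk, hcov⟩
    rcases (covers_iff p c (hkA p hpk) hc).mp hcov with h | h | h
    · exact Or.inl (Or.inl ⟨p, hpk, h⟩)
    · exact Or.inl (Or.inr ⟨p, hpk, h⟩)
    · have hnpne : normalizeChars p ≠ [] := isnorm_norm_ne p (hkA p hpk)
      have hlen : (normalizeChars p).length + 1 ≤ (normalizeChars c).length := by
        simpa using h.length_le
      have hpos : 0 < (normalizeChars p).length := List.length_pos_of_ne_nil hnpne
      refine Or.inr ⟨((normalizeChars p).length : Int), ?_, ?_, ?_⟩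
      · rw [PySem.List.mem_pyRange_one]
        constructor <;> [exact_mod_cast hpos; exact_mod_cast hlen]
      · rw [PySem.List.pyGetD_natCast,
          List.getD_eq_getElem _ _ (by omega : (normalizeChars p).length < (normalizeChars c).length),
          ]
        refine ((List.IsPrefix.getElem h (by simp)).symm).trans ?_
        rw [List.getElem_append_right (le_refl _)]
        simp
      · rw [PySem.List.slice_to (normalizeChars c)
            (b := ((normalizeChars p).length : Int)) (by exact_mod_cast Nat.zero_le _),
          Int.toNat_natCast]
        have hnp : normalizeChars p <+: normalizeChars c :=
          (List.prefix_append (normalizeChars p) ['/']).trans h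
        exact ⟨p, hpk, List.prefix_iff_eq_take.mp hnp⟩
  · rintro ((⟨p, hpk, h⟩ | ⟨p, hpk, h⟩) | ⟨i, hi, hslash, p, hpk, hsl⟩)
    · exact ⟨p, hpk, (covers_iff p c (hkA p hpk) hc).mpr (Or.inl h)⟩
    · exact ⟨p, hpk, (covers_iff p c (hkA p hpk) hc).mpr (Or.inr (Or.inl h))⟩
    · rw [PySem.List.mem_pyRange_one] at hi
      have hj : i = ((i.toNat : Nat) : Int) := (Int.toNat_of_nonneg (by omega)).symm
      have hjlt : i.toNat < (normalizeChars c).length := by omega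
      have hj1 : 1 ≤ i.toNat := by omega
      rw [hj, PySem.List.pyGetD_natCast, List.getD_eq_getElem _ _ hjlt] at hslash
      rw [PySem.List.slice_to (normalizeChars c) (b := i) (by omega)] at hsl
      refine ⟨p, hpk, (covers_iff p c (hkA p hpk) hc).mpr (Or.inr (Or.inr ?_))⟩
      rw [hsl]
      refine ⟨(normalizeChars c).drop (i.toNat + 1), ?_⟩
      rw [List.append_assoc, List.singleton_append, ← hslash,
        ← List.drop_eq_getElem_cons hjlt, List.take_append_drop]

theorem loop_eq (l : List (Int × List Char)) :
    ∀ (kA : List (List Char)) (st : PySem.Set (List Char) × List (List Char)),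
    (∀ it ∈ l, IsNorm it.2) → st.2 = kA →
    (∀ x, x ∈ st.1 ↔ ∃ p ∈ kA, normalizeChars p = x) →
    (∀ p ∈ kA, IsNorm p) →
    (l.foldl (fun st it => keepStep st it.2) st).2 =
      l.foldl (fun kept it => if kept.any (fun p => covers p it.2) then kept else kept ++ [it.2]) kA := by
  induction l with
  | nil => intro kA st _ hst _ _; exact hst
  | cons it l ih =>
    intro kA st hgood hst hmem hkA
    simp only [List.foldl_cons]
    have hg := guard_eq kA st.1 it.2 hmem hkA (hgood it List.mem_cons_self)
    by_cases hany : (kA.any (fun p => covers p it.2)) = true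
    · rw [if_pos hany]
      have hB : keepStep st it.2 = st := by
        unfold keepStep
        rw [if_pos (hg ▸ hany)]
      rw [hB]
      exact ih kA st (fun q hq => hgood q (List.mem_cons_of_mem it hq)) hst hmem hkA
    · rw [if_neg hany]
      have hB : keepStep st it.2 = (st.1.add (normalizeChars it.2), st.2 ++ [it.2]) := by
        unfold keepStep
        rw [if_neg (hg ▸ hany)]
      rw [hB]
      refine ih (kA ++ [it.2]) _ (fun q hq => hgood q (List.mem_cons_of_mem it hq)) ?_ ?_ ?_
      · rw [hst]
      · intro x
        rw [PySem.Set.mem_add, hmem x]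
        constructor
        · rintro (⟨p, hpk, hx⟩ | hx)
          · exact ⟨p, List.mem_append_left _ hpk, hx⟩
          · exact ⟨it.2, List.mem_append_right _ List.mem_cons_self, hx.symm⟩
        · rintro ⟨p, hpk, hx⟩
          rcases List.mem_append.mp hpk with hp | hp
          · exact Or.inl ⟨p, hp, hx⟩
          · rw [List.mem_singleton.mp hp] at hx
            exact Or.inr hx.symm
      · intro q hq
        rcases List.mem_append.mp hq with hq | hq
        · exact hkA q hq
        · rw [List.mem_singleton.mp hq]
          exact hgood it List.mem_cons_self

-- ===== VERDICT (by name: the statement is the Claim_ definition above) =====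
theorem minimize_prefixes_spec : Claim_equal_minimize_prefixes := by
  intro values _
  unfold Spec_minimize_prefixes minimize_prefixes minimize_prefixes_alt
  rw [dedupe_eq]
  rw [← snd_sorted2 (dedupePrefixes values), List.foldl_map]
  congr 1
  refine (loop_eq _ [] _ ?_ rfl ?_ ?_).symm
  · intro it hit
    have h1 : it ∈ PySem.List.enumerate (dedupePrefixes values) :=
      ((PySem.List.sorted2_perm _ _ _ _).mem_iff).mp hit
    have h2 : it.2 ∈ dedupePrefixes values := by
      rw [← PySem.List.map_snd_enumerate (dedupePrefixes values) 0]
      exact List.mem_map_of_mem h1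
    exact dedupe_isnorm values it.2 h2
  · intro x; simp [PySem.Set.empty]
  · intro p hp; cases hp
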